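-- pv_equiv track=rewrite | github.com/docxology/ivm-xyz | ivm_xyz/polyhedra/edge_counting.py | half_oct_edges
-- ===== SOURCE A (Python) =====
-- def sqr(n: int) -> int:
--     """Square number n."""
--     return n ** 2
--
-- def half_oct_edges(f: int) -> int:
--     """
--     Number of contact points between equal spheres arranged in a half octahedron
--     with f intervals along each edge.
--
--     Each layer of sqr(N) balls spawns N half-octahedrons, with 4*N edges
--     to the next layer of N+1 balls per edge, plus (layer+1)*layer*2 layer edges.
--
--     Args:
--         f: Frequency (number of intervals along each edge)
--
--     Returns:
--         int: Total number of edges/contact points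
--
--     References:
--         https://oeis.org/A035006
--     """
--     cumm = 0
--     for layer in range(1, f + 1):
--         if layer == 1:
--             cumm = 8
--         else:
--             cumm = cumm + sqr(layer) * 4 + (layer + 1) * layer * 2
--     return cumm
-- ===== SOURCE B (Python) =====
-- def half_oct_edges(f: int) -> int:
--     # Closed form (OEIS A035006): 2*f*(f+1)^2 for f >= 1, else 0.
--     if f < 1:
--         return 0
--     return 2 * f * (f + 1) ** 2
-- ===== Notes on version B (the rewrite author's own statement) =====
-- stated objective: faster
-- what changed: Replaced the layer-by-layer accumulation loop with the closed-form polynomial 2*f*(f+1)^2 (Faulhaber sums).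
import Mathlib
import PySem

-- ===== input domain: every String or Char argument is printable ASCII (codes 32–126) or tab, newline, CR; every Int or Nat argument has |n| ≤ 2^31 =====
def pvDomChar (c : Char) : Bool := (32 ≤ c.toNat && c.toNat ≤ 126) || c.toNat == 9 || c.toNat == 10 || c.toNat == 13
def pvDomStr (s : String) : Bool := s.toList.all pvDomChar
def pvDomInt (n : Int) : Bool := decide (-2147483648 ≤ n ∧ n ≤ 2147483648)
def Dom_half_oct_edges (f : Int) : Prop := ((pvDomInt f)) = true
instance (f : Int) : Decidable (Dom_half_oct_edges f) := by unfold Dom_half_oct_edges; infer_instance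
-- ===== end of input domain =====

-- B replaces A's layer loop with the closed form 2*f*(f+1)^2 (objective: faster, O(1) vs O(f)).

-- ===== PORT A =====
def sqr (n : Int) : Int := n ^ 2

def half_oct_edges (f : Int) : Int :=
  (PySem.List.pyRange 1 (f + 1) 1).foldl
    (fun cumm layer => if layer == 1 then 8 else cumm + sqr layer * 4 + (layer + 1) * layer * 2) 0

-- ===== PORT B =====
def half_oct_edges_alt (f : Int) : Int :=
  if f < 1 then 0 else 2 * f * (f + 1) ^ 2

-- ===== PRECONDITION & SPEC =====
def Spec_half_oct_edges (f : Int) (out : Int) : Prop := out = half_oct_edges_alt f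
instance (f : Int) (out : Int) : Decidable (Spec_half_oct_edges f out) := by unfold Spec_half_oct_edges; infer_instance

-- ===== CLAIM (what is proved, stated in full; the proofs are below) =====
def Claim_equal_half_oct_edges : Prop := ∀ (f : Int), Dom_half_oct_edges f → Spec_half_oct_edges f (half_oct_edges f)

-- ===== LEMMAS AND PROOFS =====
theorem half_oct_loop_closed (n : Nat) :
    (PySem.List.pyRange 1 ((n : Int) + 1) 1).foldl
      (fun cumm layer => if layer == 1 then 8 else cumm + sqr layer * 4 + (layer + 1) * layer * 2) 0
    = if (n : Int) < 1 then 0 else 2 * (n : Int) * ((n : Int) + 1) ^ 2 := by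
  induction n with
  | zero => simp [PySem.List.pyRange_one_eq_nil]
  | succ m ih =>
    have h1 : (1 : Int) ≤ (m : Int) + 1 := by omega
    have : ((m + 1 : Nat) : Int) + 1 = ((m : Int) + 1) + 1 := by push_cast; ring
    rw [this, PySem.List.pyRange_one_succ_right h1, List.foldl_append, ih]
    cases m with
    | zero => norm_num [sqr]
    | succ k =>
      have hne : ((k : Int) + 1 + 1 == 1) = false := by
        simp; omega
      simp only [List.foldl, Nat.cast_succ, hne, Bool.false_eq_true, if_false, sqr]
      split_ifs <;> first | omega | ring

-- ===== VERDICT (by name: the statement is the Claim_ definition above) =====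
theorem half_oct_edges_spec : Claim_equal_half_oct_edges := by
  intro f _
  unfold Spec_half_oct_edges half_oct_edges half_oct_edges_alt
  by_cases hf : f < 1
  · rw [PySem.List.pyRange_one_eq_nil (by omega)]
    simp [if_pos hf]
  · have hn : f = ((f.toNat : Int)) := by omega
    rw [hn, half_oct_loop_closed]
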